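-- pv_equiv track=rewrite | github.com/smaurice69/adventofcode | 2017/day4.py | is_anagram_free
-- ===== SOURCE A (Python) =====
-- def is_anagram_free(words):
--     seen = set()
--     for word in words:
--         key = ''.join(sorted(word))  # canonical form
--         if key in seen:
--             return False  # found an anagram of a previous word
--         seen.add(key)
--     return True
-- ===== SOURCE B (Python) =====
-- def is_anagram_free(words):
--     keys = sorted(''.join(sorted(w)) for w in words)
--     return all(x != y for x, y in zip(keys, keys[1:]))
-- ===== Notes on version B (the rewrite author's own statement) =====
-- stated objective: alternative
-- what changed: Replaces A's hash-set membership loop with early return by sort-then-scan: sort the canonical keys and check that no two adjacent sorted keys are equal.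
import Mathlib
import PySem

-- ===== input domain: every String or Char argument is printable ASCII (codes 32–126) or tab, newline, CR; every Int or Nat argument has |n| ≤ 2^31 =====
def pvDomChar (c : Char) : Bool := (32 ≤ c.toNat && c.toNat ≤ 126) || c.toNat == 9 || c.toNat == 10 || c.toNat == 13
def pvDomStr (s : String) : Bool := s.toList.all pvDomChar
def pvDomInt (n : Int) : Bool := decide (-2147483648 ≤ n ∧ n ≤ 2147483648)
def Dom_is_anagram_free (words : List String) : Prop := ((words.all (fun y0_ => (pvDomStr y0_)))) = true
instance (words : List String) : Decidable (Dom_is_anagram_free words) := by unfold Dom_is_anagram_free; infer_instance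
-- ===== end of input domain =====

-- B replaces A's incremental hash-set membership loop (with early return) by a
-- sort-then-scan: sort the canonical keys, then check no two ADJACENT sorted keys
-- are equal (objective: alternative algorithm — sorting instead of hashing).

-- ''.join(sorted(word)) — canonical anagram key, kept as its character list
def pvKey (w : String) : List Char := PySem.List.sorted w.toList (fun c => c) false

-- ===== PORT A =====
-- the 'for word in words' loop with its early 'return False', as structural recursion over (words, seen)
def pvLoopA (words : List String) (seen : PySem.Set (List Char)) : Bool :=
  match words with
  | [] => true
  | word :: rest =>
    let key := pvKey word
    if PySem.Set.contains seen key then false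
    else pvLoopA rest (PySem.Set.add seen key)

def is_anagram_free (words : List String) : Bool :=
  pvLoopA words PySem.Set.empty

-- ===== PORT B =====
-- keys = sorted(canonical key of each word); all(x != y for x, y in zip(keys, keys[1:]))
def is_anagram_free_alt (words : List String) : Bool :=
  let keys := PySem.List.sorted (words.map pvKey) (fun k => k) false
  (keys.zip keys.tail).all (fun p => p.1 != p.2)

-- ===== PRECONDITION & SPEC =====
def Spec_is_anagram_free (words : List String) (out : Bool) : Prop := out = is_anagram_free_alt words
instance (words : List String) (out : Bool) : Decidable (Spec_is_anagram_free words out) := by unfold Spec_is_anagram_free; infer_instance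

-- ===== CLAIM (what is proved, stated in full; the proofs are below) =====
def Claim_equal_is_anagram_free : Prop := ∀ (words : List String), Dom_is_anagram_free words → Spec_is_anagram_free words (is_anagram_free words)

-- ===== LEMMAS AND PROOFS =====

-- A's loop succeeds iff the keys of the remaining words are distinct and avoid the seen set
lemma pvLoopA_spec (words : List String) :
    ∀ (seen : PySem.Set (List Char)),
      pvLoopA words seen = true ↔
        ((words.map pvKey).Nodup ∧ ∀ k ∈ words.map pvKey, k ∉ seen) := by
  induction words with
  | nil => intro seen; simp [pvLoopA]
  | cons w rest ih =>
    intro seen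
    by_cases hmem : pvKey w ∈ seen
    · simp [pvLoopA, hmem]
    · simp only [pvLoopA, List.map_cons]
      rw [if_neg (by simpa [PySem.Set.contains_iff] using hmem)]
      rw [ih]
      constructor
      · rintro ⟨hnd, havoid⟩
        refine ⟨List.nodup_cons.mpr ⟨fun hc => ?_, hnd⟩, ?_⟩
        · exact absurd ((PySem.Set.mem_add seen (pvKey w) (pvKey w)).mpr (Or.inr rfl))
            (havoid _ hc)
        · intro k hk
          rcases List.mem_cons.mp hk with h | h
          · exact h ▸ hmem
          · exact fun hks =>
              (havoid k h) ((PySem.Set.mem_add seen (pvKey w) k).mpr (Or.inl hks))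
      · rintro ⟨hnd, havoid⟩
        rcases List.nodup_cons.mp hnd with ⟨hnotin, hnd'⟩
        refine ⟨hnd', fun k hk hka => ?_⟩
        rcases (PySem.Set.mem_add seen (pvKey w) k).mp hka with h | h
        · exact havoid k (List.mem_cons_of_mem _ hk) h
        · exact hnotin (h ▸ hk)

-- on a list sorted by ≤, adjacent distinctness is exactly duplicate-freeness
lemma adj_ne_iff_nodup : ∀ (l : List (List Char)), l.Pairwise (· ≤ ·) →
    (((l.zip l.tail).all fun p => p.1 != p.2) = true ↔ l.Nodup)
  | [], _ => by simp
  | [a], _ => by simp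
  | a :: b :: t, hp => by
    rcases List.pairwise_cons.mp hp with ⟨hale, hp'⟩
    rw [show (a :: b :: t).zip (a :: b :: t).tail = (a, b) :: ((b :: t).zip t) by simp [List.zip]]
    simp only [List.all_cons, Bool.and_eq_true, bne_iff_ne, ne_eq, List.nodup_cons]
    have ih := adj_ne_iff_nodup (b :: t) hp'
    simp only [List.tail_cons, List.nodup_cons] at ih
    rw [ih]
    constructor
    · rintro ⟨hab, hnd⟩
      refine ⟨fun hmem => ?_, hnd⟩
      have hab' : a < b := lt_of_le_of_ne (hale b (by simp)) hab
      rcases List.mem_cons.mp hmem with rfl | hmt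
      · exact hab rfl
      · rcases List.pairwise_cons.mp hp' with ⟨hble, -⟩
        exact absurd rfl (ne_of_lt (lt_of_lt_of_le hab' (hble a hmt)))
    · rintro ⟨hnotin, hnd⟩
      exact ⟨fun e => hnotin (e ▸ List.mem_cons_self), hnd⟩

-- the same sort, elaborated with the lexicographic LinearOrder on List Char (what the order lemmas use)
def pvLexSorted (l : List (List Char)) : List (List Char) :=
  @PySem.List.sorted (List Char) (List Char) List.instLinearOrder.toLT LinearOrder.toDecidableLT l (fun k => k) false

-- core's List LT and the lexicographic order decide identically, so the two sorts coincide
lemma pvSorted_eq_lex (l : List (List Char)) :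
    PySem.List.sorted l (fun k => k) false = pvLexSorted l := by
  unfold pvLexSorted
  rw [PySem.List.sorted_eq_foldl_insertBy,
      @PySem.List.sorted_eq_foldl_insertBy (List Char) (List Char) List.instLinearOrder.toLT
        LinearOrder.toDecidableLT l (fun k => k)]
  congr 1
  funext acc x
  congr 1
  funext a b
  rw [decide_eq_decide]

lemma pvLexSorted_pairwise (l : List (List Char)) : (pvLexSorted l).Pairwise (· ≤ ·) :=
  PySem.List.sorted_pairwise l (fun k => k)

lemma pvLexSorted_perm (l : List (List Char)) : (pvLexSorted l).Perm l :=
  @PySem.List.sorted_perm (List Char) (List Char) List.instLinearOrder.toLT LinearOrder.toDecidableLT l (fun k => k) false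

-- ===== VERDICT (by name: the statement is the Claim_ definition above) =====
theorem is_anagram_free_spec : Claim_equal_is_anagram_free := by
  intro words _
  unfold Spec_is_anagram_free is_anagram_free is_anagram_free_alt
  dsimp only
  rw [Bool.eq_iff_iff, pvLoopA_spec words PySem.Set.empty, pvSorted_eq_lex]
  rw [adj_ne_iff_nodup _ (pvLexSorted_pairwise (words.map pvKey))]
  rw [(pvLexSorted_perm (words.map pvKey)).nodup_iff]
  constructor
  · rintro ⟨hnd, -⟩; exact hnd
  · intro h; exact ⟨h, by simp [PySem.Set.empty]⟩
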